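-- pv_equiv track=rewrite | github.com/pypi-data/pypi-mirror-379 | packages/content-extraction/content_extraction-0.5.0-py3-none-any.whl/content_extraction/fix_ocr.py | apply_heading_patches
-- ===== SOURCE A (Python) =====
-- from typing import Iterable
--
-- def parse_ndiff(diff_lines: Iterable[str]) -> list[tuple[str, str]]:
--     """
--     Turn an ndiff iterable into a list of (old_line, new_line) patches.
--
--     Only pairs up “- old” followed by “+ new” within the same hunk.
--     """
--     patches: list[tuple[str, str]] = []
--     pending_old = None
--
--     for line in diff_lines:
--         if line.startswith('- '):
--             pending_old = line[2:]
--         elif line.startswith('+ ') and pending_old is not None: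
--             patches.append((pending_old, line[2:]))
--             pending_old = None
--         elif line.startswith('  ') or not line:
--             patches.append((pending_old or '', ''))
--             pending_old = None
--
--     return patches
--
-- def apply_heading_patches(ocr_text: str, diff_lines: Iterable[str]) -> str:
--     """
--     Apply heading corrections from an ndiff iterable to the OCR text.
--
--     For each (old, new) patch, replace the first exact match of old in the OCR
--     text with new.
--     """
--     patches = parse_ndiff(diff_lines)
--     lines = ocr_text.splitlines()
--
--     for old_heading, new_heading in patches:
--         for idx, line in enumerate(lines):
--             if line == old_heading:
--                 lines[idx] = new_heading
--                 break
--
--     return '\n'.join(lines)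
-- ===== SOURCE B (Python) =====
-- from bisect import insort
-- from typing import Iterable
--
-- def apply_heading_patches(ocr_text: str, diff_lines: Iterable[str]) -> str:
--     """Single pass over the diff, with a value->sorted-index map so each
--     replacement pops the minimal index for the value instead of scanning all lines."""
--     lines = ocr_text.splitlines()
--     index: dict[str, list[int]] = {}
--     for i, line in enumerate(lines):
--         index.setdefault(line, []).append(i)
--
--     def replace_first(old: str, new: str) -> None:
--         idxs = index.get(old)
--         if idxs:
--             i = idxs.pop(0)
--             lines[i] = new
--             insort(index.setdefault(new, []), i)
--
--     pending_old = None
--     for dline in diff_lines: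
--         if dline.startswith('- '):
--             pending_old = dline[2:]
--         elif dline.startswith('+ ') and pending_old is not None:
--             replace_first(pending_old, dline[2:])
--             pending_old = None
--         elif dline.startswith('  ') or not dline:
--             replace_first(pending_old or '', '')
--             pending_old = None
--
--     return '\n'.join(lines)
-- ===== Notes on version B (the rewrite author's own statement) =====
-- stated objective: alternative
-- what changed: B replaces A's per-patch linear scan over all OCR lines with a single pre-built value->sorted-index-list map, popping the minimum index per patch and re-inserting the replaced index under the new value, fused into one pass over the diff.
import Mathlib
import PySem

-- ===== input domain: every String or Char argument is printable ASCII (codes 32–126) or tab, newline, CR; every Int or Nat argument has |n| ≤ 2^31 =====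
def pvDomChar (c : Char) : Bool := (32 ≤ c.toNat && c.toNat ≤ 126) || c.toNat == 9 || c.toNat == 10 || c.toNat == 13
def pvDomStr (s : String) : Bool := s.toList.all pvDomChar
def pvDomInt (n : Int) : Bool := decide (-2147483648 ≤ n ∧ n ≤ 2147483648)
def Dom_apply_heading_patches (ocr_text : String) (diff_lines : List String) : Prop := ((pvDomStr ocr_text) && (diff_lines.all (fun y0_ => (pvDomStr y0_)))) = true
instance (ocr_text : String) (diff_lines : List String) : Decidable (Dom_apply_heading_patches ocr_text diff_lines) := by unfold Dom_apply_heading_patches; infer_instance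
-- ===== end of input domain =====

-- B replaces A's per-patch scan over all lines by a value->sorted-index-list map popped per patch; return values proved equal on the whole domain.


-- ===== PORT A =====
-- parse_ndiff, transliterated: foldl over diff_lines with state (patches, pending_old).
-- 'pending_old or ""' is ported as Option.getD "" (Some "" and None both yield "").
def pvParseNdiff (diff_lines : List String) : List (String × String) :=
  (diff_lines.foldl (fun (st : List (String × String) × Option String) line =>
      if PySem.Str.startswith line "- " then
        (st.1, some (PySem.Str.slice line (some 2) none))
      else if PySem.Str.startswith line "+ " && st.2.isSome then
        (st.1 ++ [(st.2.getD "", PySem.Str.slice line (some 2) none)], none)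
      else if PySem.Str.startswith line "  " || line == "" then
        (st.1 ++ [(st.2.getD "", "")], none)
      else st)
    ([], none)).1

-- A's inner loop: enumerate + break + lines[idx] = new, i.e. replace the first line equal to old.
def pvReplaceFirstA (old new : String) : List String → List String
  | [] => []
  | l :: ls => if l = old then new :: ls else l :: pvReplaceFirstA old new ls

def apply_heading_patches (ocr_text : String) (diff_lines : List String) : String :=
  PySem.Str.join "\n" ((pvParseNdiff diff_lines).foldl (fun ls p => pvReplaceFirstA p.1 p.2 ls)
    (PySem.Str.splitlines ocr_text))

-- ===== PORT B =====
-- bisect.insort on a list of Nat indices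
def pvInsort (i : Nat) : List Nat → List Nat
  | [] => [i]
  | j :: js => if i ≤ j then i :: j :: js else j :: pvInsort i js

-- index.setdefault(line, []).append(i) over enumerate(lines)
def pvBuildIdx (d : PySem.Dict String (List Nat)) (n : Nat) : List String → PySem.Dict String (List Nat)
  | [] => d
  | l :: ls => pvBuildIdx (d.insert l (d.getD l [] ++ [n])) (n + 1) ls

-- replace_first: pop the minimal index of old, set that line, insort the index under new
def pvReplaceFirstB (old new : String) (lines : List String) (d : PySem.Dict String (List Nat)) :
    List String × PySem.Dict String (List Nat) :=
  match d.getD old [] with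
  | [] => (lines, d)
  | i :: rest =>
      let lines' := lines.set i new
      let d2 := d.insert old rest
      (lines', d2.insert new (pvInsort i (d2.getD new [])))

-- one step of B's single pass over the diff lines
def pvBStep (st : (List String × PySem.Dict String (List Nat)) × Option String) (dline : String) :
    (List String × PySem.Dict String (List Nat)) × Option String :=
  if PySem.Str.startswith dline "- " then
    (st.1, some (PySem.Str.slice dline (some 2) none))
  else if PySem.Str.startswith dline "+ " && st.2.isSome then
    (pvReplaceFirstB (st.2.getD "") (PySem.Str.slice dline (some 2) none) st.1.1 st.1.2, none)
  else if PySem.Str.startswith dline "  " || dline == "" then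
    (pvReplaceFirstB (st.2.getD "") "" st.1.1 st.1.2, none)
  else st

def apply_heading_patches_alt (ocr_text : String) (diff_lines : List String) : String :=
  PySem.Str.join "\n" (diff_lines.foldl pvBStep
    ((PySem.Str.splitlines ocr_text, pvBuildIdx PySem.Dict.empty 0 (PySem.Str.splitlines ocr_text)), none)).1.1

-- ===== PRECONDITION & SPEC =====
def Spec_apply_heading_patches (ocr_text : String) (diff_lines : List String) (out : String) : Prop := out = apply_heading_patches_alt ocr_text diff_lines
instance (ocr_text : String) (diff_lines : List String) (out : String) : Decidable (Spec_apply_heading_patches ocr_text diff_lines out) := by unfold Spec_apply_heading_patches; infer_instance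

-- ===== CLAIM (what is proved, stated in full; the proofs are below) =====
def Claim_equal_apply_heading_patches : Prop := ∀ (ocr_text : String) (diff_lines : List String), Dom_apply_heading_patches ocr_text diff_lines → Spec_apply_heading_patches ocr_text diff_lines (apply_heading_patches ocr_text diff_lines)

-- ===== LEMMAS AND PROOFS =====

-- positions of value v in the line list, in increasing order
def pvPosOf (v : String) : List String → List Nat
  | [] => []
  | l :: ls => if l = v then 0 :: (pvPosOf v ls).map (· + 1) else (pvPosOf v ls).map (· + 1)

-- the invariant tying B's index map to the current line list
def pvInv (lines : List String) (d : PySem.Dict String (List Nat)) : Prop :=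
  ∀ v, d.getD v [] = pvPosOf v lines

theorem pvPosOf_pairwise (v : String) (ls : List String) : (pvPosOf v ls).Pairwise (· < ·) := by
  induction ls with
  | nil => simp [pvPosOf]
  | cons l ls ih =>
    simp only [pvPosOf]
    split
    · refine List.Pairwise.cons ?_ (List.pairwise_map.mpr (ih.imp (by omega)))
      intro j hj
      simp only [List.mem_map] at hj
      omega
    · exact List.pairwise_map.mpr (ih.imp (by omega))

theorem pvInsort_cons (i : Nat) (xs : List Nat) (h : ∀ j ∈ xs, i ≤ j) : pvInsort i xs = i :: xs := by
  cases xs with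
  | nil => rfl
  | cons j js => simp [pvInsort, h j (by simp)]

theorem pvInsort_zero (xs : List Nat) : pvInsort 0 xs = 0 :: xs :=
  pvInsort_cons 0 xs (fun _ _ => Nat.zero_le _)

theorem pvInsort_map_succ (i : Nat) (xs : List Nat) :
    pvInsort (i + 1) (xs.map (· + 1)) = (pvInsort i xs).map (· + 1) := by
  induction xs with
  | nil => rfl
  | cons j js ih =>
    simp only [List.map, pvInsort]
    by_cases h : i ≤ j
    · simp [h, Nat.succ_le_succ h]
    · simp [h, ih]

theorem pvMap_cons {f : Nat → Nat} {P : List Nat} {i : Nat} {rest : List Nat}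
    (h : P.map f = i :: rest) : ∃ i' rest', P = i' :: rest' ∧ i = f i' ∧ rest = rest'.map f := by
  cases P with
  | nil => simp at h
  | cons a as =>
    simp only [List.map, List.cons.injEq] at h
    exact ⟨a, as, rfl, h.1.symm, h.2.symm⟩

theorem pvPosOf_nil_replace (old new : String) (lines : List String)
    (h : pvPosOf old lines = []) : pvReplaceFirstA old new lines = lines := by
  induction lines with
  | nil => rfl
  | cons l ls ih =>
    simp only [pvPosOf] at h
    split at h
    · simp at h
    · rename_i hne
      simp only [List.map_eq_nil_iff] at h
      simp [pvReplaceFirstA, hne, ih h]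

theorem pvPosOf_cons_replace (old new : String) (lines : List String) (i : Nat) (rest : List Nat)
    (h : pvPosOf old lines = i :: rest) : pvReplaceFirstA old new lines = lines.set i new := by
  induction lines generalizing i rest with
  | nil => simp [pvPosOf] at h
  | cons l ls ih =>
    simp only [pvPosOf] at h
    split at h
    · rename_i heq
      simp only [List.cons.injEq] at h
      simp [pvReplaceFirstA, heq, ← h.1]
    · rename_i hne
      obtain ⟨i', rest', hP, hi, hrest⟩ := pvMap_cons h
      subst hi
      simp [pvReplaceFirstA, hne, ih i' rest' hP]

theorem pvPosOf_get (old : String) (lines : List String) (i : Nat) (rest : List Nat)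
    (h : pvPosOf old lines = i :: rest) : lines[i]? = some old := by
  induction lines generalizing i rest with
  | nil => simp [pvPosOf] at h
  | cons l ls ih =>
    simp only [pvPosOf] at h
    split at h
    · rename_i heq
      simp only [List.cons.injEq] at h
      simp [← h.1, heq]
    · obtain ⟨i', rest', hP, hi, hrest⟩ := pvMap_cons h
      subst hi
      simpa using ih i' rest' hP

-- the three pvPosOf-after-set facts, old ≠ new
theorem pvPosOf_set_old (old new : String) (hne : old ≠ new) (lines : List String)
    (i : Nat) (rest : List Nat) (h : pvPosOf old lines = i :: rest) :
    pvPosOf old (lines.set i new) = rest := by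
  induction lines generalizing i rest with
  | nil => simp [pvPosOf] at h
  | cons l ls ih =>
    simp only [pvPosOf] at h
    split at h
    · rename_i heq
      simp only [List.cons.injEq] at h
      simp [← h.1, pvPosOf, heq, Ne.symm hne, h.2]
    · rename_i hlne
      obtain ⟨i', rest', hP, hi, hrest⟩ := pvMap_cons h
      subst hi; subst hrest
      simp [pvPosOf, hlne, ih i' rest' hP]

theorem pvPosOf_set_new (old new : String) (hne : old ≠ new) (lines : List String)
    (i : Nat) (rest : List Nat) (h : pvPosOf old lines = i :: rest) :
    pvPosOf new (lines.set i new) = pvInsort i (pvPosOf new lines) := by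
  induction lines generalizing i rest with
  | nil => simp [pvPosOf] at h
  | cons l ls ih =>
    simp only [pvPosOf] at h
    split at h
    · rename_i heq
      simp only [List.cons.injEq] at h
      subst heq
      simp [← h.1, pvPosOf, hne, pvInsort_zero]
    · rename_i hlne
      obtain ⟨i', rest', hP, hi, hrest⟩ := pvMap_cons h
      subst hi
      by_cases hl : l = new
      · simp [pvPosOf, hl, ih i' rest' hP, pvInsort, pvInsort_map_succ]
      · simp [pvPosOf, hl, ih i' rest' hP, pvInsort_map_succ]

theorem pvPosOf_set_other (old new v : String) (hvo : v ≠ old) (hvn : v ≠ new)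
    (lines : List String) (i : Nat) (rest : List Nat) (h : pvPosOf old lines = i :: rest) :
    pvPosOf v (lines.set i new) = pvPosOf v lines := by
  induction lines generalizing i rest with
  | nil => simp [pvPosOf] at h
  | cons l ls ih =>
    simp only [pvPosOf] at h
    split at h
    · rename_i heq
      simp only [List.cons.injEq] at h
      subst heq
      simp [← h.1, pvPosOf, Ne.symm hvn, Ne.symm hvo]
    · obtain ⟨i', rest', hP, hi, hrest⟩ := pvMap_cons h
      subst hi
      simp only [List.set_cons_succ, pvPosOf, ih i' rest' hP]

-- B's replace_first computes A's replace-first and preserves the invariant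
theorem pvSetSelf (ls : List String) (i : Nat) (a : String) (h : ls[i]? = some a) :
    ls.set i a = ls := by
  induction ls generalizing i with
  | nil => simp at h
  | cons l ls ih =>
    cases i with
    | zero => simp_all
    | succ j => simp_all

theorem pvReplaceFirstB_spec (old new : String) (lines : List String)
    (d : PySem.Dict String (List Nat)) (hInv : pvInv lines d) :
    (pvReplaceFirstB old new lines d).1 = pvReplaceFirstA old new lines ∧
    pvInv (pvReplaceFirstA old new lines) (pvReplaceFirstB old new lines d).2 := by
  have hold := hInv old
  cases hP : pvPosOf old lines with
  | nil =>
    rw [hP] at hold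
    simp only [pvReplaceFirstB, hold, pvPosOf_nil_replace old new lines hP]
    exact ⟨by trivial, hInv⟩
  | cons i rest =>
    rw [hP] at hold
    have hA := pvPosOf_cons_replace old new lines i rest hP
    have hpw := pvPosOf_pairwise old lines
    rw [hP, List.pairwise_cons] at hpw
    by_cases hon : old = new
    · subst hon
      have hself : lines.set i old = lines := pvSetSelf lines i old (pvPosOf_get old lines i rest hP)
      have hins : pvInsort i rest = i :: rest :=
        pvInsort_cons i rest (fun j hj => Nat.le_of_lt (hpw.1 j hj))
      simp only [pvReplaceFirstB, hold, PySem.Dict.getD_insert_self,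
        PySem.Dict.insert_insert_self, hins, hA, hself]
      refine ⟨by trivial, fun v => ?_⟩
      rw [PySem.Dict.getD_insert]
      split
      · rename_i hv; rw [hv, hP]
      · exact hInv v
    · have hd2 : (d.insert old rest).getD new [] = pvPosOf new lines := by
        rw [PySem.Dict.getD_insert, if_neg (Ne.symm hon), hInv new]
      simp only [pvReplaceFirstB, hold, hd2, hA]
      refine ⟨by trivial, fun v => ?_⟩
      rw [PySem.Dict.getD_insert]
      split
      · rename_i hv
        rw [hv, pvPosOf_set_new old new hon lines i rest hP]
      · rename_i hv
        rw [PySem.Dict.getD_insert]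
        split
        · rename_i hv2
          rw [hv2, pvPosOf_set_old old new hon lines i rest hP]
        · rename_i hv2
          rw [pvPosOf_set_other old new v hv2 hv lines i rest hP, hInv v]

-- parse_ndiff's foldl, recursively
def pvParseAux (pending : Option String) : List String → List (String × String)
  | [] => []
  | line :: ds =>
    if PySem.Str.startswith line "- " then pvParseAux (some (PySem.Str.slice line (some 2) none)) ds
    else if PySem.Str.startswith line "+ " && pending.isSome then
      (pending.getD "", PySem.Str.slice line (some 2) none) :: pvParseAux none ds
    else if PySem.Str.startswith line "  " || line == "" then
      (pending.getD "", "") :: pvParseAux none ds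
    else pvParseAux pending ds

theorem pvParseFold (ds : List String) (acc : List (String × String)) (pending : Option String) :
    (ds.foldl (fun (st : List (String × String) × Option String) line =>
      if PySem.Str.startswith line "- " then
        (st.1, some (PySem.Str.slice line (some 2) none))
      else if PySem.Str.startswith line "+ " && st.2.isSome then
        (st.1 ++ [(st.2.getD "", PySem.Str.slice line (some 2) none)], none)
      else if PySem.Str.startswith line "  " || line == "" then
        (st.1 ++ [(st.2.getD "", "")], none)
      else st) (acc, pending)).1 = acc ++ pvParseAux pending ds := by
  induction ds generalizing acc pending with
  | nil => simp [pvParseAux]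
  | cons l ds ih =>
    simp only [List.foldl_cons, pvParseAux]
    split_ifs with h1 h2 h3
    · rw [ih]
    · rw [ih]; simp
    · rw [ih]; simp
    · rw [ih]

theorem pvMain (ds : List String) (lines : List String) (d : PySem.Dict String (List Nat))
    (pending : Option String) (hInv : pvInv lines d) :
    (ds.foldl pvBStep ((lines, d), pending)).1.1 =
      (pvParseAux pending ds).foldl (fun ls p => pvReplaceFirstA p.1 p.2 ls) lines := by
  induction ds generalizing lines d pending with
  | nil => simp [pvParseAux]
  | cons l ds ih =>
    simp only [List.foldl_cons, pvBStep, pvParseAux]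
    split_ifs with h1 h2 h3
    · exact ih lines d _ hInv
    · obtain ⟨hL, hI⟩ :=
        pvReplaceFirstB_spec (pending.getD "") (PySem.Str.slice l (some 2) none) lines d hInv
      rw [List.foldl_cons,
        show pvReplaceFirstB (pending.getD "") (PySem.Str.slice l (some 2) none) lines d =
          ((pvReplaceFirstB (pending.getD "") (PySem.Str.slice l (some 2) none) lines d).1,
           (pvReplaceFirstB (pending.getD "") (PySem.Str.slice l (some 2) none) lines d).2) from rfl,
        hL]
      exact ih _ _ none hI
    · obtain ⟨hL, hI⟩ := pvReplaceFirstB_spec (pending.getD "") "" lines d hInv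
      rw [List.foldl_cons,
        show pvReplaceFirstB (pending.getD "") "" lines d =
          ((pvReplaceFirstB (pending.getD "") "" lines d).1,
           (pvReplaceFirstB (pending.getD "") "" lines d).2) from rfl,
        hL]
      exact ih _ _ none hI
    · exact ih lines d pending hInv

theorem pvBuildIdx_getD (ls : List String) (d : PySem.Dict String (List Nat)) (n : Nat) (v : String) :
    (pvBuildIdx d n ls).getD v [] = d.getD v [] ++ (pvPosOf v ls).map (· + n) := by
  induction ls generalizing d n with
  | nil => simp [pvBuildIdx, pvPosOf]
  | cons l ls ih =>
    simp only [pvBuildIdx]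
    rw [ih, PySem.Dict.getD_insert]
    by_cases hv : v = l
    · subst hv
      simp [pvPosOf, List.append_assoc]
      try exact fun a _ => by omega
    · simp [hv, pvPosOf, Ne.symm hv]
      try exact fun a _ => by omega

-- ===== VERDICT (by name: the statement is the Claim_ definition above) =====
theorem apply_heading_patches_spec : Claim_equal_apply_heading_patches := by
  intro ocr_text diff_lines _
  unfold Spec_apply_heading_patches apply_heading_patches apply_heading_patches_alt pvParseNdiff
  have hInv : pvInv (PySem.Str.splitlines ocr_text)
      (pvBuildIdx PySem.Dict.empty 0 (PySem.Str.splitlines ocr_text)) := by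
    intro v
    rw [pvBuildIdx_getD]
    simp [PySem.Dict.getD_empty]
  rw [pvParseFold, pvMain _ _ _ _ hInv]
  simp
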